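-- pv_equiv track=rewrite | github.com/vaadin/platform-in-test-script | python/repos.py | filter_starters
-- ===== SOURCE A (Python) =====
-- PRESETS = [
--     "latest-java",
--     "latest-java-top",
--     "latest-java_partial-auth",
--     "flow-crm-tutorial",
--     "react",
--     "react-crm-tutorial",
--     "react-tutorial",
--     "test-hybrid-react",
--     "default",
--     "latest-java_partial-auth_partial-prerelease",
--     "archetype-hotswap",
--     "archetype-jetty",
--     "archetype-spring",
--     "vaadin-quarkus",
--     "hilla-react-cli",
--     "initializer-vaadin-maven-react",
--     "initializer-vaadin-maven-flow",
--     "initializer-vaadin-gradle-react",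
--     "initializer-vaadin-gradle-flow",
--     "collaboration"
-- ]
--
-- DEMOS = [
--     "control-center",
--     "skeleton-starter-flow",
--     "skeleton-starter-flow-spring",
--     "skeleton-starter-hilla-react",
--     "skeleton-starter-hilla-react-gradle",
--     "skeleton-starter-flow-cdi",
--     "skeleton-starter-hilla-lit",
--     "skeleton-starter-hilla-lit-gradle",
--     "skeleton-starter-kotlin-spring",
--     "business-app-starter-flow",
--     "base-starter-spring-gradle",
--     "base-starter-flow-quarkus",
--     "base-starter-gradle",
--     "flow-crm-tutorial",
--     "hilla-crm-tutorial",
--     "hilla-quickstart-tutorial",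
--     "hilla-basics-tutorial",
--     "flow-quickstart-tutorial",
--     "addon-template",
--     "npm-addon-template",
--     "client-server-addon-template",
--     "spreadsheet-demo",
--     "vaadin-form-example",
--     "vaadin-rest-example"
-- ]
--
-- ALL_STARTERS = PRESETS + DEMOS
--
-- def get_default_starters():
--     """Return default list of starters (non-empty items)."""
--     return [s for s in ALL_STARTERS if s.strip()]
--
-- def filter_starters(starter_list: str, exclude_patterns: list = None) -> list:
--     """
--     Filter starters based on inclusion/exclusion patterns.
--
--     Args:
--         starter_list: Comma-separated list of starters
--         exclude_patterns: List of patterns to exclude (starting with '!')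
--
--     Returns:
--         List of valid starter names
--     """
--     if not starter_list:
--         return get_default_starters()
--
--     starters = [s.strip() for s in starter_list.split(',') if s.strip()]
--
--     # Process exclusions
--     if exclude_patterns:
--         for pattern in exclude_patterns:
--             if pattern.startswith('!'):
--                 exclude_name = pattern[1:]
--                 starters = [s for s in starters if s != exclude_name]
--
--     # Validate against known starters
--     valid_starters = []
--     for starter in starters:
--         base_name = starter.split(':')[0]  # Handle repo:branch format
--         if base_name in PRESETS or base_name in DEMOS:
--             valid_starters.append(starter)
--
--     return valid_starters
-- ===== SOURCE B (Python) =====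
-- PRESETS = [
--     "latest-java",
--     "latest-java-top",
--     "latest-java_partial-auth",
--     "flow-crm-tutorial",
--     "react",
--     "react-crm-tutorial",
--     "react-tutorial",
--     "test-hybrid-react",
--     "default",
--     "latest-java_partial-auth_partial-prerelease",
--     "archetype-hotswap",
--     "archetype-jetty",
--     "archetype-spring",
--     "vaadin-quarkus",
--     "hilla-react-cli",
--     "initializer-vaadin-maven-react",
--     "initializer-vaadin-maven-flow",
--     "initializer-vaadin-gradle-react",
--     "initializer-vaadin-gradle-flow",
--     "collaboration"
-- ]
--
-- DEMOS = [
--     "control-center",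
--     "skeleton-starter-flow",
--     "skeleton-starter-flow-spring",
--     "skeleton-starter-hilla-react",
--     "skeleton-starter-hilla-react-gradle",
--     "skeleton-starter-flow-cdi",
--     "skeleton-starter-hilla-lit",
--     "skeleton-starter-hilla-lit-gradle",
--     "skeleton-starter-kotlin-spring",
--     "business-app-starter-flow",
--     "base-starter-spring-gradle",
--     "base-starter-flow-quarkus",
--     "base-starter-gradle",
--     "flow-crm-tutorial",
--     "hilla-crm-tutorial",
--     "hilla-quickstart-tutorial",
--     "hilla-basics-tutorial",
--     "flow-quickstart-tutorial",
--     "addon-template",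
--     "npm-addon-template",
--     "client-server-addon-template",
--     "spreadsheet-demo",
--     "vaadin-form-example",
--     "vaadin-rest-example"
-- ]
--
-- ALL_STARTERS = PRESETS + DEMOS
--
-- def get_default_starters():
--     """Return default list of starters (non-empty items)."""
--     return [s for s in ALL_STARTERS if s.strip()]
--
--
-- def filter_starters(starter_list: str, exclude_patterns: list = None) -> list:
--     """Single fused pass: strip, exclusion-set test and validity-set test per item."""
--     if not starter_list:
--         return [s for s in ALL_STARTERS if s.strip()]
--     exclude = {p[1:] for p in (exclude_patterns or []) if p.startswith('!')}
--     valid = set(PRESETS) | set(DEMOS)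
--     out = []
--     for raw in starter_list.split(','):
--         s = raw.strip()
--         if s and s not in exclude and s.split(':')[0] in valid:
--             out.append(s)
--     return out
-- ===== Notes on version B (the rewrite author's own statement) =====
-- stated objective: simpler
-- what changed: Replaces A's per-pattern list-rescanning exclusion loop plus separate validation loop with one fused pass over the split items, testing each stripped item against a precomputed exclusion set and a combined valid set.
import Mathlib
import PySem

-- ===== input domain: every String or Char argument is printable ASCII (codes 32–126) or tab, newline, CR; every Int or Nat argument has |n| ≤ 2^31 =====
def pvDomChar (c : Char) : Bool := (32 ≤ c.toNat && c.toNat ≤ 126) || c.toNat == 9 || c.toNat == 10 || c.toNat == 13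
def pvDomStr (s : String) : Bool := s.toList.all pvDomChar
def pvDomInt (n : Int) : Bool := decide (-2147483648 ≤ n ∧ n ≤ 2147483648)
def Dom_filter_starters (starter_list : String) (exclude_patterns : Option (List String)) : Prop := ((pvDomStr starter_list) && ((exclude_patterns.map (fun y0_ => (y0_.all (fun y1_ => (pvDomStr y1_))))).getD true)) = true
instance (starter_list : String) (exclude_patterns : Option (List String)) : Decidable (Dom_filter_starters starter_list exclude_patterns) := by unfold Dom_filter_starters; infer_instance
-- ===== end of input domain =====

-- B fuses A's per-pattern exclusion loop and separate validation loop into one pass with precomputed sets (objective: simpler).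

-- ===== PORT A =====
def pvPresets : List String := [
  "latest-java", "latest-java-top", "latest-java_partial-auth", "flow-crm-tutorial",
  "react", "react-crm-tutorial", "react-tutorial", "test-hybrid-react", "default",
  "latest-java_partial-auth_partial-prerelease", "archetype-hotswap", "archetype-jetty",
  "archetype-spring", "vaadin-quarkus", "hilla-react-cli", "initializer-vaadin-maven-react",
  "initializer-vaadin-maven-flow", "initializer-vaadin-gradle-react",
  "initializer-vaadin-gradle-flow", "collaboration"]

def pvDemos : List String := [
  "control-center", "skeleton-starter-flow", "skeleton-starter-flow-spring",
  "skeleton-starter-hilla-react", "skeleton-starter-hilla-react-gradle",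
  "skeleton-starter-flow-cdi", "skeleton-starter-hilla-lit", "skeleton-starter-hilla-lit-gradle",
  "skeleton-starter-kotlin-spring", "business-app-starter-flow", "base-starter-spring-gradle",
  "base-starter-flow-quarkus", "base-starter-gradle", "flow-crm-tutorial", "hilla-crm-tutorial",
  "hilla-quickstart-tutorial", "hilla-basics-tutorial", "flow-quickstart-tutorial",
  "addon-template", "npm-addon-template", "client-server-addon-template", "spreadsheet-demo",
  "vaadin-form-example", "vaadin-rest-example"]

def pvAllStarters : List String := pvPresets ++ pvDemos

def pvGetDefaultStarters : List String :=
  pvAllStarters.filter (fun s => PySem.Str.strip s ≠ "")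

def filter_starters (starter_list : String) (exclude_patterns : Option (List String)) : List String :=
  if starter_list == "" then pvGetDefaultStarters
  else
    -- starters = [s.strip() for s in starter_list.split(',') if s.strip()]
    let starters :=
      ((((PySem.Str.split? starter_list ",").getD [])).filter (fun s => PySem.Str.strip s ≠ "")).map
        (fun s => PySem.Str.strip s)
    -- if exclude_patterns: for pattern in exclude_patterns: …
    let starters :=
      match exclude_patterns with
      | none => starters
      | some ps =>
        if ps.isEmpty then starters
        else
          ps.foldl (fun st pattern =>
            if PySem.Str.startswith pattern "!" then
              let excludeName := PySem.Str.slice pattern (some 1) none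
              st.filter (fun s => s ≠ excludeName)
            else st) starters
    -- validation loop
    starters.foldl (fun acc starter =>
      let baseName := (((PySem.Str.split? starter ":").getD [])).headD ""
      if pvPresets.contains baseName || pvDemos.contains baseName then acc ++ [starter]
      else acc) []

-- ===== PORT B =====
def filter_starters_alt (starter_list : String) (exclude_patterns : Option (List String)) : List String :=
  if starter_list == "" then pvAllStarters.filter (fun s => PySem.Str.strip s ≠ "")
  else
    let exclude : PySem.Set String :=
      PySem.Set.ofList
        (((exclude_patterns.getD []).filter (fun p => PySem.Str.startswith p "!")).map
          (fun p => PySem.Str.slice p (some 1) none))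
    let valid : PySem.Set String := PySem.Set.union (PySem.Set.ofList pvPresets) pvDemos
    (((PySem.Str.split? starter_list ",").getD [])).foldl (fun out raw =>
      let s := PySem.Str.strip raw
      if (s != "") && !(PySem.Set.contains exclude s)
          && PySem.Set.contains valid ((((PySem.Str.split? s ":").getD [])).headD "") then out ++ [s]
      else out) []

-- ===== PRECONDITION & SPEC =====
def Spec_filter_starters (starter_list : String) (exclude_patterns : Option (List String)) (out : List String) : Prop := out = filter_starters_alt starter_list exclude_patterns
instance (starter_list : String) (exclude_patterns : Option (List String)) (out : List String) : Decidable (Spec_filter_starters starter_list exclude_patterns out) := by unfold Spec_filter_starters; infer_instance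

-- ===== CLAIM (what is proved, stated in full; the proofs are below) =====
def Claim_equal_filter_starters : Prop := ∀ (starter_list : String) (exclude_patterns : Option (List String)), Dom_filter_starters starter_list exclude_patterns → Spec_filter_starters starter_list exclude_patterns (filter_starters starter_list exclude_patterns)

-- ===== LEMMAS AND PROOFS =====

-- the '!'-pattern names collected from a pattern list
def pvExclNames (ps : List String) : List String :=
  (ps.filter (fun p => PySem.Str.startswith p "!")).map (fun p => PySem.Str.slice p (some 1) none)

-- A's per-pattern rescanning loop is one filter against the collected names
theorem excl_fold_eq_filter (ps : List String) (L : List String) :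
    ps.foldl (fun st pattern =>
      if PySem.Str.startswith pattern "!" then
        let excludeName := PySem.Str.slice pattern (some 1) none
        st.filter (fun s => s ≠ excludeName)
      else st) L
    = L.filter (fun s => !(pvExclNames ps).contains s) := by
  induction ps generalizing L with
  | nil => simp [pvExclNames]
  | cons p ps ih =>
    simp only [List.foldl_cons]
    have hp2 : PySem.Chars.startswith p.toList ['!'] = (PySem.Str.startswith p "!") := by simp
    by_cases hp : PySem.Str.startswith p "!"
    · simp only [hp, if_true]
      rw [ih, List.filter_filter]
      have hn : pvExclNames (p :: ps) = PySem.Str.slice p (some 1) none :: pvExclNames ps := by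
        simp only [pvExclNames, List.filter_cons, hp2]
        rw [if_pos hp]
        rfl
      rw [hn]
      apply List.filter_congr
      intro x _
      by_cases hx : x = PySem.Str.slice p (some 1) none <;> simp [hx]
    · rw [if_neg hp]
      have hn : pvExclNames (p :: ps) = pvExclNames ps := by
        simp only [pvExclNames, List.filter_cons, hp2]
        rw [if_neg hp]
      rw [ih, hn]

theorem set_ofList_contains {α : Type} [BEq α] [LawfulBEq α] (l : List α) (x : α) :
    PySem.Set.contains (PySem.Set.ofList l) x = l.contains x := by
  rw [Bool.eq_iff_iff]
  simp [PySem.Set.mem_ofList]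

theorem valid_contains (x : String) :
    PySem.Set.contains (PySem.Set.union (PySem.Set.ofList pvPresets) pvDemos) x
      = (pvPresets.contains x || pvDemos.contains x) := by
  rw [Bool.eq_iff_iff]
  simp [PySem.Set.contains_iff, PySem.Set.mem_union, PySem.Set.mem_ofList]

-- the shared tail: exclusion filter + validation loop over the stripped pieces equals B's fused pass
set_option maxHeartbeats 2000000 in
theorem tail_eq (pieces ps : List String) :
    ((((pieces.filter (fun s => PySem.Str.strip s ≠ "")).map (fun s => PySem.Str.strip s)).filter
        (fun s => !(pvExclNames ps).contains s)).foldl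
      (fun acc starter =>
        let baseName := ((PySem.Str.split? starter ":").getD []).headD ""
        if pvPresets.contains baseName || pvDemos.contains baseName then acc ++ [starter]
        else acc) [])
    = pieces.foldl (fun out raw =>
        let s := PySem.Str.strip raw
        if (s != "") && !(PySem.Set.contains (PySem.Set.ofList (pvExclNames ps)) s)
            && PySem.Set.contains (PySem.Set.union (PySem.Set.ofList pvPresets) pvDemos)
              (((PySem.Str.split? s ":").getD []).headD "") then out ++ [s]
        else out) [] := by
  rw [PySem.List.foldl_append_if
    (p := fun raw => (PySem.Str.strip raw != "")
      && !(PySem.Set.contains (PySem.Set.ofList (pvExclNames ps)) (PySem.Str.strip raw))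
      && PySem.Set.contains (PySem.Set.union (PySem.Set.ofList pvPresets) pvDemos)
          (((PySem.Str.split? (PySem.Str.strip raw) ":").getD []).headD ""))
    (f := fun raw => PySem.Str.strip raw)]
  rw [PySem.List.foldl_append_if_eq_filter
    (p := fun starter =>
      pvPresets.contains (((PySem.Str.split? starter ":").getD []).headD "")
        || pvDemos.contains (((PySem.Str.split? starter ":").getD []).headD ""))]
  simp only [List.filter_filter, List.filter_map, set_ofList_contains, valid_contains,
    List.nil_append]
  congr 1
  apply List.filter_congr
  intro x _
  simp only [Function.comp_def, bne]
  cases hc : pvPresets.contains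
      (((PySem.Str.split? (PySem.Str.strip x) ":").getD []).headD "") <;>
  cases hd : pvDemos.contains
      (((PySem.Str.split? (PySem.Str.strip x) ":").getD []).headD "") <;>
  cases he : (pvExclNames ps).contains (PySem.Str.strip x) <;>
  (rw [Bool.eq_iff_iff]; simp [hc, hd, he])

-- ===== VERDICT (by name: the statement is the Claim_ definition above) =====
set_option maxHeartbeats 2000000 in
theorem filter_starters_spec : Claim_equal_filter_starters := by
  intro starter_list exclude_patterns _
  unfold Spec_filter_starters filter_starters filter_starters_alt
  by_cases h0 : starter_list == ""
  · simp [h0, pvGetDefaultStarters]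
  · rw [if_neg h0, if_neg h0]
    cases exclude_patterns with
    | none =>
      have h := tail_eq ((PySem.Str.split? starter_list ",").getD []) []
      simp only [pvExclNames, List.filter_nil, List.map_nil, List.contains_nil, Bool.not_false,
        List.filter_true] at h
      simpa using h
    | some ps =>
      by_cases hps : ps.isEmpty
      · rw [List.isEmpty_iff] at hps
        subst hps
        have h := tail_eq ((PySem.Str.split? starter_list ",").getD []) []
        simp only [pvExclNames, List.filter_nil, List.map_nil, List.contains_nil, Bool.not_false,
          List.filter_true] at h
        simpa using h
      · simp only [hps, if_false, Option.getD_some, Bool.false_eq_true]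
        rw [excl_fold_eq_filter]
        exact tail_eq ((PySem.Str.split? starter_list ",").getD []) ps
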